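-- pv_equiv track=rewrite | github.com/SnootierMoon/p-adic-playground | padic_digitwise_op.py | str_from_padic
-- ===== SOURCE A (Python) =====
-- import string
--
-- syms = string.digits + string.ascii_lowercase
--
-- def str_from_padic(padic):
--     seq, rpt, shr = padic
--     if max(seq) >= len(syms):
--         return "{not enough symbols to represent this number}"
--     # in the repeating part, we want to print exactly len(seq) - rpt digits.
--     # we want the last digit to be max(shr, rpt) because we don't want to print
--     # the non-repeating digits or the digits right of the dot symbol here.
--     s = "("
--     for i in range((max(shr - rpt, 0) + len(seq)) - 1, max(shr, rpt) - 1, -1):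
--         s += syms[seq[rpt + ((i - rpt) % (len(seq) - rpt))]]
--     s += ")"
--     # we can print the non-repeating digits left of the dot symbol, if any
--     for i in range(max(shr, rpt) - 1, shr - 1, -1):
--         s += syms[seq[i]]
--     if shr:
--         # we can print the symbols to the right of the dot symbol.
--         # these might not all be present in seq if seq is simplified.
--         # for example: 1/16 with p=2 is stored as seq=[1, 0], rpt=1, shr=4.
--         s += "."
--         for i in range(shr - 1, min(shr, rpt) - 1, -1):
--             s += syms[seq[rpt + ((i - rpt) % (len(seq) - rpt))]]
--         for i in range(min(shr, rpt) - 1, -1, -1):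
--             s += syms[seq[i]]
--     return s
-- ===== SOURCE B (Python) =====
-- import string
--
-- syms = string.digits + string.ascii_lowercase
--
-- def str_from_padic(padic):
--     seq, rpt, shr = padic
--     if max(seq) >= len(syms):
--         return "{not enough symbols to represent this number}"
--     n = len(seq)
--     def f(i):
--         # symbol index at position i: stored digit left of rpt, repeating digit at/above
--         return seq[i] if i < rpt else seq[rpt + (i - rpt) % (n - rpt)]
--     m = max(shr, rpt)
--     out = ["("]
--     for i in range(max(shr - rpt, 0) + n - 1, -1, -1):
--         if i + 1 == m:
--             out.append(")")
--         if shr and i + 1 == shr: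
--             out.append(".")
--         out.append(syms[f(i)])
--     if m <= 0:
--         out.append(")")
--     return "".join(out)
-- ===== Notes on version B (the rewrite author's own statement) =====
-- stated objective: simpler
-- what changed: replaces A's four separate range loops and repeating/non-repeating case split by one descending position loop with a position-to-digit helper f(i) and boundary markers that emit ')' and '.' when the index crosses max(shr,rpt) and shr
-- outside the precondition, e.g. on str_from_padic(([-1], -1, 1)): A returns '(zz).zz', B returns '(zz).z'; on str_from_padic(([1], 0, -1)): A returns '(1)1.', B returns '(1)'
import Mathlib
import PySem

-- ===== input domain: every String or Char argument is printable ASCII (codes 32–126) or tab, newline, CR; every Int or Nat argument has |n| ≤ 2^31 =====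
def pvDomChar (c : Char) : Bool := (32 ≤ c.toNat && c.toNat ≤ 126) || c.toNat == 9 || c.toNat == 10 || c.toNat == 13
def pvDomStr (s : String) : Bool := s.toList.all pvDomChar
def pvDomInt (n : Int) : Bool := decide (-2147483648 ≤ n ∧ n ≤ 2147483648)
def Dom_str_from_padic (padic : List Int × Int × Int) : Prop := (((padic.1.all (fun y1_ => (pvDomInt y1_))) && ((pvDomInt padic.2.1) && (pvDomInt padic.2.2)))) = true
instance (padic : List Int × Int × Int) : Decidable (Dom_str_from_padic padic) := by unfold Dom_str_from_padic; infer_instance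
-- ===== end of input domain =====

-- B replaces A's four region loops and repeating/non-repeating case split by ONE descending
-- position loop with a position→digit helper and boundary markers for ')' and '.' (objective:
-- simpler decomposition; same cost).

-- shared module context: syms = string.digits + string.ascii_lowercase, and the digit lookups
def pvSyms : String := "0123456789abcdefghijklmnopqrstuvwxyz"
-- syms[d] (default never reached inside Pre_: the symbol guard has already returned)
def pvSym (d : Int) : Char := (PySem.Str.pyGet? pvSyms d).getD '?'
-- seq[i] (default never reached inside Pre_)
def pvAt (seq : List Int) (i : Int) : Int := (PySem.List.pyGet? seq i).getD 0
-- seq[rpt + (i - rpt) % (len(seq) - rpt)]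
def pvRep (seq : List Int) (rpt i : Int) : Int :=
  pvAt seq (rpt + PySem.Int.mod (i - rpt) ((seq.length : Int) - rpt))

-- ===== PORT A =====
-- loop bodies of A's four ranged loops: s += syms[seq[rpt + (i-rpt)%(len(seq)-rpt)]] / s += syms[seq[i]]
def pvStepRep (seq : List Int) (rpt : Int) (s : String) (i : Int) : String :=
  s.push (pvSym (pvRep seq rpt i))
def pvStepAt (seq : List Int) (s : String) (i : Int) : String :=
  s.push (pvSym (pvAt seq i))

def str_from_padic (padic : List Int × Int × Int) : String :=
  match padic with
  | (seq, rpt, shr) =>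
    if PySem.Str.len pvSyms ≤ (PySem.List.max? seq (fun x => x)).getD 0 then
      "{not enough symbols to represent this number}"
    else
      let n : Int := seq.length
      let s := (PySem.List.pyRange (max (shr - rpt) 0 + n - 1) (max shr rpt - 1) (-1)).foldl
        (pvStepRep seq rpt) "("
      let s := s.push ')'
      let s := (PySem.List.pyRange (max shr rpt - 1) (shr - 1) (-1)).foldl (pvStepAt seq) s
      if shr ≠ 0 then
        let s := s.push '.'
        let s := (PySem.List.pyRange (shr - 1) (min shr rpt - 1) (-1)).foldl
          (pvStepRep seq rpt) s
        (PySem.List.pyRange (min shr rpt - 1) (-1) (-1)).foldl (pvStepAt seq) s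
      else s

-- ===== PORT B =====
-- f(i): digit shown at position i
def pvF (seq : List Int) (rpt i : Int) : Int :=
  if i < rpt then pvAt seq i else pvRep seq rpt i

-- body of B's single loop: the two boundary markers, then the symbol of position i
def pvStepB (seq : List Int) (rpt shr : Int) (s : String) (i : Int) : String :=
  let s := if i + 1 = max shr rpt then s.push ')' else s
  let s := if shr ≠ 0 ∧ i + 1 = shr then s.push '.' else s
  s.push (pvSym (pvF seq rpt i))

def str_from_padic_alt (padic : List Int × Int × Int) : String :=
  match padic with
  | (seq, rpt, shr) =>
    if PySem.Str.len pvSyms ≤ (PySem.List.max? seq (fun x => x)).getD 0 then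
      "{not enough symbols to represent this number}"
    else
      let n : Int := seq.length
      let out := (PySem.List.pyRange (max (shr - rpt) 0 + n - 1) (-1) (-1)).foldl
        (pvStepB seq rpt shr) "("
      if max shr rpt ≤ 0 then out.push ')' else out

-- ===== PRECONDITION & SPEC =====
-- Pre_ admits a nonempty digit list whenever some digit is ≥ 36 (the symbol-limit guard fires first,
-- both programs return the sentinel), and otherwise restricts to the natural domain of the
-- representation: 0 ≤ rpt ≤ len(seq) (a nonempty repeating block, rpt < len(seq), is required as soon
-- as shr > rpt, else A divides by zero), 0 ≤ shr, and digits ≥ -36. Outside it A raises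
-- (ValueError/ZeroDivisionError/IndexError) or returns a value only by accident of Python's
-- negative-index wraparound for negative rpt/shr.
def Pre_str_from_padic (padic : List Int × Int × Int) : Prop :=
  padic.1 ≠ [] ∧ ((∃ d ∈ padic.1, 36 ≤ d) ∨
    (0 ≤ padic.2.1 ∧ 0 ≤ padic.2.2 ∧ padic.2.1 ≤ (padic.1.length : Int) ∧
      (padic.2.1 = (padic.1.length : Int) → padic.2.2 ≤ padic.2.1) ∧ ∀ d ∈ padic.1, -36 ≤ d))
instance (padic : List Int × Int × Int) : Decidable (Pre_str_from_padic padic) := by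
  unfold Pre_str_from_padic; infer_instance

def pvWitness_str_from_padic : (List Int × Int × Int) := ([1, 0], 1, 4)

def Spec_str_from_padic (padic : List Int × Int × Int) (out : String) : Prop := out = str_from_padic_alt padic
instance (padic : List Int × Int × Int) (out : String) : Decidable (Spec_str_from_padic padic out) := by unfold Spec_str_from_padic; infer_instance

-- ===== CLAIM (what is proved, stated in full; the proofs are below) =====
def Claim_equal_str_from_padic : Prop := ∀ (padic : List Int × Int × Int), Dom_str_from_padic padic → Pre_str_from_padic padic → Spec_str_from_padic padic (str_from_padic padic)

-- ===== LEMMAS AND PROOFS =====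

-- a descending range splits at any interior point
lemma pvRangeSplit (a b c : Int) (h1 : c ≤ b) (h2 : b ≤ a) :
    PySem.List.pyRange a c (-1) =
      PySem.List.pyRange a b (-1) ++ PySem.List.pyRange b c (-1) := by
  rw [PySem.List.pyRange_neg_one_eq_reverse a c, PySem.List.pyRange_neg_one_eq_reverse a b,
    PySem.List.pyRange_neg_one_eq_reverse b c, ← List.reverse_append,
    ← PySem.List.pyRange_one_append (c + 1) (b + 1) (a + 1) (by omega) (by omega)]

-- on a segment strictly above both markers, B's step is A's repeating-part step
lemma pvFoldB_rep_hi (seq : List Int) (rpt shr a b : Int) (h : max shr rpt - 1 ≤ b)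
    (s : String) :
    (PySem.List.pyRange a b (-1)).foldl (pvStepB seq rpt shr) s =
      (PySem.List.pyRange a b (-1)).foldl (pvStepRep seq rpt) s := by
  apply PySem.List.foldl_congr_mem
  intro acc x hx
  obtain ⟨hb, ha⟩ := PySem.List.mem_pyRange_neg_one.1 hx
  have hA : ¬ (x + 1 = max shr rpt) := by omega
  have hB : ¬ (shr ≠ 0 ∧ x + 1 = shr) := by omega
  have hC : ¬ x < rpt := by omega
  simp only [pvStepB, pvStepRep, pvF, if_neg hA, if_neg hB, if_neg hC]

-- on a repeating segment strictly below the dot, B's step is A's repeating-part step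
lemma pvFoldB_rep_mid (seq : List Int) (rpt shr a b : Int) (h1 : a + 1 < shr)
    (h2 : rpt - 1 ≤ b) (s : String) :
    (PySem.List.pyRange a b (-1)).foldl (pvStepB seq rpt shr) s =
      (PySem.List.pyRange a b (-1)).foldl (pvStepRep seq rpt) s := by
  apply PySem.List.foldl_congr_mem
  intro acc x hx
  obtain ⟨hb, ha⟩ := PySem.List.mem_pyRange_neg_one.1 hx
  have hm : shr ≤ max shr rpt := le_max_left _ _
  have hA : ¬ (x + 1 = max shr rpt) := by omega
  have hB : ¬ (shr ≠ 0 ∧ x + 1 = shr) := by omega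
  have hC : ¬ x < rpt := by omega
  simp only [pvStepB, pvStepRep, pvF, if_neg hA, if_neg hB, if_neg hC]

-- on a stored-digit segment away from both markers, B's step is A's direct-digit step
lemma pvFoldB_at (seq : List Int) (rpt shr a b : Int) (h1 : a + 1 < max shr rpt)
    (h2 : shr - 1 ≤ b ∨ a + 1 < shr) (h3 : a < rpt) (s : String) :
    (PySem.List.pyRange a b (-1)).foldl (pvStepB seq rpt shr) s =
      (PySem.List.pyRange a b (-1)).foldl (pvStepAt seq) s := by
  apply PySem.List.foldl_congr_mem
  intro acc x hx
  obtain ⟨hb, ha⟩ := PySem.List.mem_pyRange_neg_one.1 hx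
  have hA : ¬ (x + 1 = max shr rpt) := by omega
  have hB : ¬ (shr ≠ 0 ∧ x + 1 = shr) := by omega
  have hC : x < rpt := by omega
  simp only [pvStepB, pvStepAt, pvF, if_neg hA, if_neg hB, if_pos hC]

-- B's step at the position that closes the parenthesis (no dot there)
lemma pvStepB_close (seq : List Int) (rpt shr i : Int) (s : String)
    (h1 : i + 1 = max shr rpt) (h2 : ¬ (shr ≠ 0 ∧ i + 1 = shr)) (h3 : i < rpt) :
    pvStepB seq rpt shr s i = pvStepAt seq (s.push ')') i := by
  simp only [pvStepB, pvStepAt, pvF, if_pos h1, if_neg h2, if_pos h3]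

-- B's step at the dot position when it does not also close the parenthesis
lemma pvStepB_dot (seq : List Int) (rpt shr i : Int) (s : String)
    (h1 : ¬ i + 1 = max shr rpt) (h2 : shr ≠ 0 ∧ i + 1 = shr) (h3 : i < rpt) :
    pvStepB seq rpt shr s i = pvStepAt seq (s.push '.') i := by
  simp only [pvStepB, pvStepAt, pvF, if_neg h1, if_pos h2, if_pos h3]

-- B's step where ')' and '.' coincide, stored digit follows
lemma pvStepB_close_dot (seq : List Int) (rpt shr i : Int) (s : String)
    (h1 : i + 1 = max shr rpt) (h2 : shr ≠ 0 ∧ i + 1 = shr) (h3 : i < rpt) :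
    pvStepB seq rpt shr s i = pvStepAt seq ((s.push ')').push '.') i := by
  simp only [pvStepB, pvStepAt, pvF, if_pos h1, if_pos h2, if_pos h3]

-- B's step where ')' and '.' coincide, repeating digit follows
lemma pvStepB_close_dot_rep (seq : List Int) (rpt shr i : Int) (s : String)
    (h1 : i + 1 = max shr rpt) (h2 : shr ≠ 0 ∧ i + 1 = shr) (h3 : ¬ i < rpt) :
    pvStepB seq rpt shr s i = pvStepRep seq rpt ((s.push ')').push '.') i := by
  simp only [pvStepB, pvStepRep, pvF, if_pos h1, if_pos h2, if_neg h3]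

-- the whole claim, destructured
lemma pvMain (seq : List Int) (rpt shr : Int) (hseq : seq ≠ [])
    (hr0 : 0 ≤ rpt) (hs0 : 0 ≤ shr) (hrn : rpt ≤ (seq.length : Int))
    (hre : rpt = (seq.length : Int) → shr ≤ rpt) :
    str_from_padic (seq, rpt, shr) = str_from_padic_alt (seq, rpt, shr) := by
  have hn1 : 1 ≤ (seq.length : Int) := by
    have := List.length_pos_iff.2 hseq
    omega
  unfold str_from_padic str_from_padic_alt
  by_cases hg : PySem.Str.len pvSyms ≤ (PySem.List.max? seq (fun x => x)).getD 0
  · simp only [if_pos hg]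
  · simp only [if_neg hg]
    set n : Int := (seq.length : Int) with hn
    by_cases hc : shr ≤ rpt
    · -- A's non-repeating part is left of the close-paren: m = rpt, top = n - 1
      have hmax : max shr rpt = rpt := by omega
      have hmin : min shr rpt = shr := by omega
      have htop : max (shr - rpt) 0 + n - 1 = n - 1 := by omega
      rw [htop, hmax, hmin,
        PySem.List.pyRange_neg_one_eq_nil (le_refl (shr - 1)),
        pvRangeSplit (n - 1) (rpt - 1) (-1) (by omega) (by omega),
        List.foldl_append,
        pvFoldB_rep_hi seq rpt shr (n - 1) (rpt - 1) (by omega)]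
      simp only [List.foldl_nil]
      by_cases hs : shr = 0
      · subst hs
        rw [if_neg (by omega : ¬ ((0:Int) ≠ 0))]
        by_cases hrz : rpt = 0
        · subst hrz
          rw [show (0:Int) - 1 = -1 by norm_num,
            PySem.List.pyRange_neg_one_eq_nil (by omega : (-1:Int) ≤ -1),
            if_pos (by omega : (0:Int) ≤ 0)]
          simp only [List.foldl_nil]
        · rw [show (0:Int) - 1 = -1 by norm_num, if_neg (by omega : ¬ rpt ≤ 0),
            PySem.List.pyRange_neg_one_cons (by omega : (-1:Int) < rpt - 1)]
          simp only [List.foldl_cons]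
          rw [pvStepB_close seq rpt 0 (rpt - 1) _ (by omega) (by omega) (by omega),
            pvFoldB_at seq rpt 0 (rpt - 1 - 1) (-1) (by omega) (Or.inl (by omega)) (by omega)]
      · rw [if_pos (by omega : shr ≠ 0), if_neg (by omega : ¬ rpt ≤ 0)]
        by_cases hsr : shr = rpt
        · rw [hsr, PySem.List.pyRange_neg_one_eq_nil (by omega : rpt - 1 ≤ rpt - 1)]
          simp only [List.foldl_nil]
          rw [PySem.List.pyRange_neg_one_cons (by omega : (-1:Int) < rpt - 1)]
          simp only [List.foldl_cons]
          rw [pvStepB_close_dot seq rpt rpt (rpt - 1) _ (by omega) ⟨by omega, by omega⟩ (by omega),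
            pvFoldB_at seq rpt rpt (rpt - 1 - 1) (-1) (by omega) (Or.inr (by omega)) (by omega)]
        · rw [pvRangeSplit (rpt - 1) (shr - 1) (-1) (by omega) (by omega), List.foldl_append,
            PySem.List.pyRange_neg_one_cons (by omega : shr - 1 < rpt - 1)]
          simp only [List.foldl_cons]
          rw [pvStepB_close seq rpt shr (rpt - 1) _ (by omega) (by omega) (by omega),
            pvFoldB_at seq rpt shr (rpt - 1 - 1) (shr - 1) (by omega) (Or.inl (by omega)) (by omega),
            PySem.List.pyRange_neg_one_cons (by omega : (-1:Int) < shr - 1)]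
          simp only [List.foldl_cons]
          rw [pvStepB_dot seq rpt shr (shr - 1) _ (by omega) ⟨by omega, by omega⟩ (by omega),
            pvFoldB_at seq rpt shr (shr - 1 - 1) (-1) (by omega) (Or.inr (by omega)) (by omega)]
    · -- the dot lies inside the repeating part: m = shr, min = rpt, and rpt < n
      have hrltn : rpt < n := by
        rcases lt_or_eq_of_le hrn with h | h
        · exact h
        · exact absurd (hre h) (by omega)
      have hmax : max shr rpt = shr := by omega
      have hmin : min shr rpt = rpt := by omega
      have htop : max (shr - rpt) 0 + n - 1 = shr - rpt + n - 1 := by omega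
      rw [htop, hmax, hmin,
        PySem.List.pyRange_neg_one_eq_nil (le_refl (shr - 1)),
        if_pos (by omega : shr ≠ 0),
        pvRangeSplit (shr - rpt + n - 1) (shr - 1) (-1) (by omega) (by omega),
        pvRangeSplit (shr - 1) (rpt - 1) (-1) (by omega) (by omega),
        PySem.List.pyRange_neg_one_cons (by omega : rpt - 1 < shr - 1),
        List.foldl_append, List.foldl_append,
        pvFoldB_rep_hi seq rpt shr (shr - rpt + n - 1) (shr - 1) (by omega),
        if_neg (by omega : ¬ shr ≤ 0)]
      simp only [List.foldl_nil, List.foldl_cons]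
      rw [pvStepB_close_dot_rep seq rpt shr (shr - 1) _ (by omega) (by omega) (by omega),
        pvFoldB_rep_mid seq rpt shr (shr - 1 - 1) (rpt - 1) (by omega) (by omega),
        pvFoldB_at seq rpt shr (rpt - 1) (-1) (by omega) (by omega) (by omega)]

-- if some digit is at least 36, the symbol-limit guard fires
lemma pvGuard (seq : List Int) (d : Int) (hd : d ∈ seq) (h36 : 36 ≤ d) :
    PySem.Str.len pvSyms ≤ (PySem.List.max? seq (fun x => x)).getD 0 := by
  obtain ⟨m, hm⟩ : ∃ m, PySem.List.max? seq (fun x => x) = some m := by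
    cases hmax : PySem.List.max? seq (fun x => x) with
    | none =>
      have : seq = [] := (PySem.List.max?_eq_none_iff seq (fun x => x)).1 hmax
      simp [this] at hd
    | some m => exact ⟨m, rfl⟩
  have hlen : PySem.Str.len pvSyms = 36 := by decide
  rw [hm, hlen, Option.getD_some]
  exact le_trans h36 (PySem.List.max?_isMax hm d hd)

-- ===== VERDICT (by name: the statement is the Claim_ definition above) =====
theorem str_from_padic_spec : Claim_equal_str_from_padic := by
  rintro ⟨seq, rpt, shr⟩ _ ⟨h1, hrest⟩
  unfold Spec_str_from_padic
  rcases hrest with ⟨d, hd, h36⟩ | ⟨h2, h3, h4, h5, _⟩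
  · unfold str_from_padic str_from_padic_alt
    simp only [if_pos (pvGuard seq d hd h36)]
  · exact pvMain seq rpt shr h1 h2 h3 h4 h5
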